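-- pv_equiv track=rewrite | github.com/antonitomaszewski/Studia | II rok/II semestr/SI/Pracownia 1/Zadanie 4/opt_dist.py | opt_dist_1
-- ===== SOURCE A (Python) =====
-- def opt_dist_1(xs, D):
--     ones = sum(xs)
--     maximum = sum(xs[0:D])
--     obecny = maximum
--     for i in range(1, len(xs)-D+1):
--         obecny += xs[i+D-1] - xs[i-1]
--         maximum = max(maximum, obecny)
--     toAdd = D - maximum
--     toRemove = ones - maximum
--     return toAdd + toRemove
-- ===== SOURCE B (Python) =====
-- def opt_dist_1(xs, D):
--     P = [0]
--     t = 0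
--     for x in xs:
--         t += x
--         P.append(t)
--     ones = t
--     wins = [P[i + D] - P[i] for i in range(len(xs) - D + 1)]
--     best = max(wins) if wins else ones
--     return (D - best) + (ones - best)
-- ===== Notes on version B (the rewrite author's own statement) =====
-- stated objective: alternative
-- what changed: Replaces the incremental sliding-window update (obecny += xs[i+D-1]-xs[i-1]) by a precomputed prefix-sum table P and a plain max over the window differences P[i+D]-P[i], falling back to the total sum when no complete window exists.
import Mathlib
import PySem

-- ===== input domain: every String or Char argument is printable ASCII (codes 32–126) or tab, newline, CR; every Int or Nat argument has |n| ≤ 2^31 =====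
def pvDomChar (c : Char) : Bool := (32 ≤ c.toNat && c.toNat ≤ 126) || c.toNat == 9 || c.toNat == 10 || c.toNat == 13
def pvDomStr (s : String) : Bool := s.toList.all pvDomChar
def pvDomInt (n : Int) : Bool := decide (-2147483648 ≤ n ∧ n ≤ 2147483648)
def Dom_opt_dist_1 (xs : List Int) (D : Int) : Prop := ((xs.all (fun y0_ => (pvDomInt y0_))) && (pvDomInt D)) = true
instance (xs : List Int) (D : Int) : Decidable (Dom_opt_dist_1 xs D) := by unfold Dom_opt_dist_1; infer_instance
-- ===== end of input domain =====

-- B replaces A's incremental sliding-window update by a prefix-sum table plus a plain max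
-- over the window differences (alternative decomposition, same cost).

-- ===== PORT A =====
def opt_dist_1 (xs : List Int) (D : Int) : Int :=
  let ones := xs.sum
  let maximum := (PySem.List.slice xs (some 0) (some D)).sum
  let st :=
    (PySem.List.pyRange 1 ((xs.length : Int) - D + 1) 1).foldl
      (fun (st : Int × Int) i =>
        let obecny := st.1 + (PySem.List.pyGetD xs (i + D - 1) 0 - PySem.List.pyGetD xs (i - 1) 0)
        (obecny, max st.2 obecny))
      (maximum, maximum)
  let toAdd := D - st.2
  let toRemove := ones - st.2
  toAdd + toRemove

-- ===== PORT B =====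
def opt_dist_1_alt (xs : List Int) (D : Int) : Int :=
  let pt := xs.foldl (fun (st : List Int × Int) x => (st.1 ++ [st.2 + x], st.2 + x)) ([0], 0)
  let P := pt.1
  let ones := pt.2
  let wins :=
    (PySem.List.pyRange 0 ((xs.length : Int) - D + 1) 1).map
      (fun i => PySem.List.pyGetD P (i + D) 0 - PySem.List.pyGetD P i 0)
  let best := match PySem.List.max? wins (fun y => y) with
    | some m => m
    | none => ones
  (D - best) + (ones - best)

-- ===== PRECONDITION & SPEC =====
-- Pre_ excludes D < 0, on which A always raises IndexError (the loop bound len(xs)-D+1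
-- exceeds the list, so an index goes out of range before the loop ends).
def Pre_opt_dist_1 (xs : List Int) (D : Int) : Prop := 0 ≤ D
instance (xs : List Int) (D : Int) : Decidable (Pre_opt_dist_1 xs D) := by unfold Pre_opt_dist_1; infer_instance
def pvWitness_opt_dist_1 : List Int × Int := ([1, 0, 1, 1, 0], 2)

def Spec_opt_dist_1 (xs : List Int) (D : Int) (out : Int) : Prop := out = opt_dist_1_alt xs D
instance (xs : List Int) (D : Int) (out : Int) : Decidable (Spec_opt_dist_1 xs D out) := by unfold Spec_opt_dist_1; infer_instance

-- ===== CLAIM (what is proved, stated in full; the proofs are below) =====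
def Claim_equal_opt_dist_1 : Prop := ∀ (xs : List Int) (D : Int), Dom_opt_dist_1 xs D → Pre_opt_dist_1 xs D → Spec_opt_dist_1 xs D (opt_dist_1 xs D)

-- ===== LEMMAS AND PROOFS =====

-- running maximum of g 0, …, g m
def runMax (g : Nat → Int) : Nat → Int
  | 0 => g 0
  | k + 1 => max (runMax g k) (g (k + 1))

lemma take_sum_succ (xs : List Int) (k : Nat) (h : k < xs.length) :
    (xs.take (k + 1)).sum = (xs.take k).sum + xs[k] := by
  rw [List.sum_take_succ]

lemma runMax_eq_foldl (g : Nat → Int) (m : Nat) :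
    ((List.range m).map (fun k => g (k + 1))).foldl max (g 0) = runMax g m := by
  induction m with
  | zero => simp [runMax]
  | succ m ih => simp [List.range_succ, runMax, ih]

-- prefix sums of l starting from accumulator t (one entry per element)
def prefs (t : Int) : List Int → List Int
  | [] => []
  | x :: r => (t + x) :: prefs (t + x) r

lemma prefs_eq (l : List Int) (t : Int) :
    prefs t l = (List.range l.length).map (fun k => t + (l.take (k + 1)).sum) := by
  induction l generalizing t with
  | nil => simp [prefs]
  | cons x r ih =>
      simp [prefs, List.range_succ_eq_map, ih, Function.comp, add_assoc]

lemma pfold (l : List Int) (acc : List Int) (t : Int) :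
    l.foldl (fun (st : List Int × Int) x => (st.1 ++ [st.2 + x], st.2 + x)) (acc, t)
      = (acc ++ prefs t l, t + l.sum) := by
  induction l generalizing acc t with
  | nil => simp [prefs]
  | cons x r ih => simp [prefs, ih, add_assoc]

lemma P_getD (xs : List Int) (j : Nat) (hj : j ≤ xs.length) :
    (0 :: prefs 0 xs).getD j 0 = (xs.take j).sum := by
  cases j with
  | zero => simp
  | succ k =>
      have hk : k < xs.length := by omega
      simp [prefs_eq, List.getD, hk]

lemma aLoop (xs : List Int) (d m : Nat) (hm : m + d ≤ xs.length) :
    (PySem.List.pyRange 1 ((m : Int) + 1) 1).foldl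
      (fun (st : Int × Int) i =>
        let obecny := st.1 + (PySem.List.pyGetD xs (i + (d : Int) - 1) 0 - PySem.List.pyGetD xs (i - 1) 0)
        (obecny, max st.2 obecny))
      ((xs.take d).sum, (xs.take d).sum)
    = ((xs.take (m + d)).sum - (xs.take m).sum,
       runMax (fun j => (xs.take (j + d)).sum - (xs.take j).sum) m) := by
  induction m with
  | zero =>
      rw [PySem.List.pyRange_one_eq_nil (by omega)]
      simp [runMax]
  | succ m ih =>
      have h1 : ((m : Int) + 1 + 1) = ((m : Int) + 1) + 1 := by ring
      rw [show ((m + 1 : Nat) : Int) + 1 = ((m : Int) + 1) + 1 by omega,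
        PySem.List.pyRange_one_succ_right (by omega), List.foldl_append,
        ih (by omega)]
    -- one more loop step, at i = m + 1
      have hmd : m + d < xs.length := by omega
      have hmx : m < xs.length := by omega
      have e1 : ((m : Int) + 1) + (d : Int) - 1 = ((m + d : Nat) : Int) := by push_cast; ring
      have e2 : ((m : Int) + 1) - 1 = ((m : Nat) : Int) := by push_cast; ring
      simp only [List.foldl_cons, List.foldl_nil, e1, e2, PySem.List.pyGetD_natCast]
      rw [List.getD_eq_getElem _ _ hmd, List.getD_eq_getElem _ _ hmx]
      have s1 := take_sum_succ xs (m + d) hmd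
      have s2 := take_sum_succ xs m hmx
      refine Prod.ext ?_ ?_
      · show _ = (xs.take (m + 1 + d)).sum - (xs.take (m + 1)).sum
        have : m + 1 + d = (m + d) + 1 := by omega
        rw [this, s1, s2]; ring
      · show _ = runMax _ (m + 1)
        have : m + 1 + d = (m + d) + 1 := by omega
        simp only [runMax, this, s1, s2]
        congr 1
        ring

lemma bList (xs : List Int) (d m : Nat) (hm : m + d ≤ xs.length) :
    (PySem.List.pyRange 0 ((m : Int) + 1) 1).map
      (fun i => PySem.List.pyGetD ([0] ++ prefs 0 xs) (i + (d : Int)) 0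
        - PySem.List.pyGetD ([0] ++ prefs 0 xs) i 0)
    = (List.range (m + 1)).map (fun k => (xs.take (k + d)).sum - (xs.take k).sum) := by
  rw [show ((m : Int) + 1) = ((m + 1 : Nat) : Int) by push_cast; ring,
    PySem.List.pyRange_zero_natCast, List.map_map]
  apply List.map_congr_left
  intro k hk
  have hk' : k < m + 1 := List.mem_range.mp hk
  have e : (k : Int) + (d : Int) = ((k + d : Nat) : Int) := by push_cast; ring
  simp only [Function.comp, List.singleton_append, e, PySem.List.pyGetD_natCast]
  rw [P_getD xs (k + d) (by omega), P_getD xs k (by omega)]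

-- ===== VERDICT (by name: the statement is the Claim_ definition above) =====
theorem opt_dist_1_spec : Claim_equal_opt_dist_1 := by
  intro xs D _ hpre
  obtain ⟨d, rfl⟩ := Int.eq_ofNat_of_zero_le hpre
  unfold Spec_opt_dist_1 opt_dist_1 opt_dist_1_alt
  rw [pfold]
  simp only [zero_add]
  have hsl : PySem.List.slice xs (some 0) (some (d : Int)) = xs.take d := by
    simp [PySem.List.slice_to_natCast]
  by_cases hd : d ≤ xs.length
  · -- at least one complete window
    set n := xs.length with hn
    set m := n - d with hmdef
    have hb : ((n : Int)) - (d : Int) + 1 = (m : Int) + 1 := by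
      have h1 : m + d = n := by omega
      omega
    rw [hb, hsl, aLoop xs d m (by omega), bList xs d m (by omega)]
    rw [List.range_succ_eq_map, List.map_cons, List.map_map]
    rw [PySem.List.max?_id_cons]
    simp only [Function.comp_def, Nat.succ_eq_add_one]
    rw [runMax_eq_foldl (fun j => (xs.take (j + d)).sum - (xs.take j).sum) m]
  · -- no complete window: D > len xs
    have hA : PySem.List.pyRange 1 ((xs.length : Int) - (d : Int) + 1) 1 = [] :=
      PySem.List.pyRange_one_eq_nil (by omega)
    have hB : PySem.List.pyRange 0 ((xs.length : Int) - (d : Int) + 1) 1 = [] :=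
      PySem.List.pyRange_one_eq_nil (by omega)
    have htake : xs.take d = xs := List.take_of_length_le (by omega)
    rw [hA, hB, hsl, htake]
    simp [PySem.List.max?]
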